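-- pv_equiv track=rewrite | github.com/s2458588/wsm-tokenizer | src/wsm_tokenizer.py | word_mapping
-- ===== SOURCE A (Python) =====
-- def word_mapping(target: str, token_dict: dict, syllables: int) -> list:
--     """Compares target to tokens in dictionary {int:[t1, t2, t3]}, returns binary string of matching characters."""
--     maps = []
--     for v in token_dict[syllables]:
--         pair = (v, target)
--         smaller = min(pair, key=len)
--         longer = max(pair, key=len)
--         diff = len(longer) - len(smaller)
--         m = []
--         step = 0
--         while step <= diff:
--             if diff == 0:
--                 for i in range(len(smaller)):
--                     m.append(1 if pair[0][i] == pair[1][i + step] else 0)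
--             else:
--                 for i in range(len(smaller)):
--                     m.append(1 if smaller[i] == longer[i + step] else 0)
--             if m[0] == 1 or m[-1] == 1:
--                 maps.append(m)
--             step += 1
--             m = []
--     return maps
-- ===== SOURCE B (Python) =====
-- def word_mapping(target: str, token_dict: dict, syllables: int) -> list:
--     """Same result as A, by a different route: per token, build the full
--     character-match matrix M[i][j] = (s[i]==l[j]) once, pick the offsets whose
--     two boundary cells show a match, and emit those diagonals of the matrix."""
--     maps = []
--     for v in token_dict[syllables]:
--         s, l = (v, target) if len(v) <= len(target) else (target, v)
--         n, m = len(s), len(l)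
--         M = [[1 if s[i] == l[j] else 0 for j in range(m)] for i in range(n)]
--         offsets = [step for step in range(m - n + 1)
--                    if M[0][step] or M[n - 1][step + n - 1]]
--         maps.extend([M[i][i + step] for i in range(n)] for step in offsets)
--     return maps
-- ===== Notes on version B (the rewrite author's own statement) =====
-- stated objective: alternative
-- what changed: B replaces A's per-offset build-every-vector-then-inspect-it while loop by a matrix formulation: per token it builds the full character-match matrix M[i][j]=(s[i]==l[j]) once, selects the offsets whose two boundary cells of M are 1, and emits those diagonals of M as the result vectors; no per-offset character comparisons remain.
-- outside the precondition, e.g. on word_mapping('ab', {1: ['']}, 1): A raises IndexError, B raises IndexError; on word_mapping('ab', {1: ['x']}, 2): A raises KeyError, B raises KeyError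
import Mathlib
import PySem

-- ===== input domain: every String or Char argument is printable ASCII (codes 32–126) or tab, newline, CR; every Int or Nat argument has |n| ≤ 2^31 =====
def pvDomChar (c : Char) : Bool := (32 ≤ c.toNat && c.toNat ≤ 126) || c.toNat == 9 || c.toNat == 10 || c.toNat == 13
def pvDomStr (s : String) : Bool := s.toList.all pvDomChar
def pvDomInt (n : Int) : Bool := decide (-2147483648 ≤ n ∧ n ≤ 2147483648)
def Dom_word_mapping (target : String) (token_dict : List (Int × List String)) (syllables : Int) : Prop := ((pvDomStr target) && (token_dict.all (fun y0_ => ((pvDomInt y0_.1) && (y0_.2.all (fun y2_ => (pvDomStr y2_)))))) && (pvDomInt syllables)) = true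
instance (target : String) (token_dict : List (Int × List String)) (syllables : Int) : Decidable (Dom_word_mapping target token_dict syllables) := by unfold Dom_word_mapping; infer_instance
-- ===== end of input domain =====

-- B builds the per-token character-match matrix once and emits its kept diagonals,
-- instead of A's per-offset build-every-vector-then-inspect-it while loop; same value.

-- ===== PORT A =====
-- inner 'for i in range(len(a)): m.append(1 if a[i]==b[i+step] else 0)'; indices are
-- always in range when this is reached, so getD with a dummy default is exact.
def wmInnerA (a b : List Char) (step : Nat) : List Int :=
  (List.range a.length).foldl
    (fun m i => m ++ [if a.getD i ' ' == b.getD (i + step) ' ' then (1 : Int) else 0]) []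

-- the 'while step <= diff' loop; fuel = number of remaining iterations (diff+1-step)
def wmWhileA (p0 p1 s l : List Char) (diff : Nat) : Nat → Nat → List (List Int)
  | _, 0 => []
  | step, fuel + 1 =>
    let m := if diff = 0 then wmInnerA p0 p1 step else wmInnerA s l step
    (if (PySem.List.pyGet? m 0 == some 1) || (PySem.List.pyGet? m (-1) == some 1)
     then [m] else []) ++ wmWhileA p0 p1 s l diff (step + 1) fuel

def word_mapping (target : String) (token_dict : List (Int × List String)) (syllables : Int) : List (List Int) :=
  match List.lookup syllables token_dict with
  | none => []  -- KeyError in Python; excluded by Pre_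
  | some tokens =>
    tokens.foldl (fun maps v =>
      let p0 := v.toList
      let p1 := target.toList
      -- min((v,target), key=len): first element with minimal length
      let smaller := if p1.length < p0.length then p1 else p0
      -- max((v,target), key=len): first element with maximal length
      let longer := if p1.length > p0.length then p1 else p0
      let diff := longer.length - smaller.length
      maps ++ wmWhileA p0 p1 smaller longer diff 0 (diff + 1)) []

-- ===== PORT B =====
-- the match matrix M[i][j] = 1 iff s[i]==l[j]
def wmMatB (s l : List Char) : List (List Int) :=
  (List.range s.length).map (fun i =>
    (List.range l.length).map (fun j => if s.getD i ' ' == l.getD j ' ' then (1 : Int) else 0))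

-- '[M[i][i+step] for i in range(n)]'; indices always in range here, so getD is exact
def wmDiagB (M : List (List Int)) (n step : Nat) : List Int :=
  (List.range n).map (fun i => (M.getD i []).getD (i + step) 0)

def word_mapping_alt (target : String) (token_dict : List (Int × List String)) (syllables : Int) : List (List Int) :=
  match List.lookup syllables token_dict with
  | none => []  -- KeyError in Python; excluded by Pre_
  | some tokens =>
    tokens.foldl (fun maps v =>
      let vl := v.toList
      let tl := target.toList
      let sl := if vl.length ≤ tl.length then (vl, tl) else (tl, vl)
      let s := sl.1
      let l := sl.2
      let n := s.length
      let m := l.length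
      let M := wmMatB s l
      -- 'if M[0][step] or M[n-1][step+n-1]': int truthiness, true iff nonzero
      let offsets := (List.range (m - n + 1)).filter (fun step =>
        ((M.getD 0 []).getD step 0 != 0) || ((M.getD (n - 1) []).getD (step + n - 1) 0 != 0))
      maps ++ offsets.map (fun step => wmDiagB M n step)) []

-- ===== PRECONDITION & SPEC =====
-- Pre_ excludes exactly the inputs where the Python A raises: a missing syllables key
-- (KeyError), and any token list containing a token while that token or the target is
-- empty (m[0]/m[-1] on the empty match vector is an IndexError).  B raises there too.
def Pre_word_mapping (target : String) (token_dict : List (Int × List String)) (syllables : Int) : Prop :=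
  List.lookup syllables token_dict ≠ none ∧
  ∀ v ∈ (List.lookup syllables token_dict).getD [], v ≠ "" ∧ target ≠ ""
instance (target : String) (token_dict : List (Int × List String)) (syllables : Int) : Decidable (Pre_word_mapping target token_dict syllables) := by unfold Pre_word_mapping; infer_instance

def pvWitness_word_mapping : String × (List (Int × List String)) × Int :=
  ("aba", [(2, ["ab", "cba"]), (1, ["x"])], 2)

def Spec_word_mapping (target : String) (token_dict : List (Int × List String)) (syllables : Int) (out : List (List Int)) : Prop := out = word_mapping_alt target token_dict syllables
instance (target : String) (token_dict : List (Int × List String)) (syllables : Int) (out : List (List Int)) : Decidable (Spec_word_mapping target token_dict syllables out) := by unfold Spec_word_mapping; infer_instance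

-- ===== CLAIM (what is proved, stated in full; the proofs are below) =====
def Claim_equal_word_mapping : Prop := ∀ (target : String) (token_dict : List (Int × List String)) (syllables : Int), Dom_word_mapping target token_dict syllables → Pre_word_mapping target token_dict syllables → Spec_word_mapping target token_dict syllables (word_mapping target token_dict syllables)

-- ===== LEMMAS AND PROOFS =====

-- A's per-step vector, as a map (the char-compare vector both sides produce)
def wmVec (s l : List Char) (step : Nat) : List Int :=
  (List.range s.length).map (fun i => if s.getD i ' ' == l.getD (i + step) ' ' then (1 : Int) else 0)

theorem wmInnerA_eq_map (a b : List Char) (step : Nat) :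
    wmInnerA a b step = wmVec a b step := by
  simpa [wmInnerA, wmVec] using
    PySem.List.foldl_append_singleton_eq_map (l := List.range a.length)
      (f := fun i => if a.getD i ' ' == b.getD (i + step) ' ' then (1 : Int) else 0) (acc := [])

-- one cell of the matrix
theorem wmMatB_cell (s l : List Char) (i j : Nat) (hi : i < s.length) (hj : j < l.length) :
    ((wmMatB s l).getD i []).getD j 0 = if s.getD i ' ' == l.getD j ' ' then (1 : Int) else 0 := by
  simp [wmMatB, List.getD, hi, hj]

-- a kept diagonal of the matrix is A's per-step vector
theorem wmDiagB_eq (s l : List Char) (step : Nat) (hstep : step ≤ l.length - s.length)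
    (hle : s.length ≤ l.length) :
    wmDiagB (wmMatB s l) s.length step = wmVec s l step := by
  unfold wmDiagB wmVec
  apply List.map_congr_left
  intro i hi
  rw [List.mem_range] at hi
  exact wmMatB_cell s l i (i + step) hi (by omega)

-- the keep-test on the built vector equals the endpoint-character test
theorem keep_eq (s l : List Char) (hs : s ≠ []) (step : Nat) :
    ((PySem.List.pyGet? (wmVec s l step) 0 == some 1) ||
       (PySem.List.pyGet? (wmVec s l step) (-1) == some 1))
      = (s.getD 0 ' ' == l.getD step ' ' ||
         s.getD (s.length - 1) ' ' == l.getD (step + s.length - 1) ' ') := by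
  have hn : 0 < s.length := List.length_pos_iff.mpr hs
  have h0 : PySem.List.pyGet? (wmVec s l step) 0 =
      some (if s.getD 0 ' ' == l.getD (0 + step) ' ' then (1 : Int) else 0) := by
    rw [PySem.List.pyGet?_zero]
    simp [wmVec, hn]
  have hlast : PySem.List.pyGet? (wmVec s l step) (-1) =
      some (if s.getD (s.length - 1) ' ' == l.getD (s.length - 1 + step) ' ' then (1 : Int) else 0) := by
    rw [PySem.List.pyGet?_neg_one]
    rw [List.getLast?_eq_getElem?]
    simp [wmVec, Nat.sub_lt hn]
  rw [h0, hlast]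
  have harith : s.length - 1 + step = step + s.length - 1 := by omega
  rw [harith]
  by_cases c1 : s.getD 0 ' ' = l.getD step ' ' <;>
    by_cases c2 : s.getD (s.length - 1) ' ' = l.getD (step + s.length - 1) ' ' <;>
      (simp only [List.getD] at c1 c2; simp [c1, c2])

-- B's matrix-boundary-cell test equals the endpoint-character test
theorem bnd_eq (s l : List Char) (hs : s ≠ []) (hle : s.length ≤ l.length)
    (step : Nat) (hstep : step ≤ l.length - s.length) :
    ((((wmMatB s l).getD 0 []).getD step 0 != 0) ||
       (((wmMatB s l).getD (s.length - 1) []).getD (step + s.length - 1) 0 != 0))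
      = (s.getD 0 ' ' == l.getD step ' ' ||
         s.getD (s.length - 1) ' ' == l.getD (step + s.length - 1) ' ') := by
  have hn : 0 < s.length := List.length_pos_iff.mpr hs
  rw [wmMatB_cell s l 0 step hn (by omega),
      wmMatB_cell s l (s.length - 1) (step + s.length - 1) (by omega) (by omega)]
  by_cases c1 : s.getD 0 ' ' = l.getD step ' ' <;>
    by_cases c2 : s.getD (s.length - 1) ' ' = l.getD (step + s.length - 1) ' ' <;>
      (simp only [List.getD] at c1 c2; simp [c1, c2])

-- A's while loop as filter-then-map over its step range; g is the per-step vector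
theorem wmWhileA_eq (p0 p1 sa la : List Char) (diff : Nat) (g : Nat → List Int)
    (hm : ∀ st : Nat, (if diff = 0 then wmInnerA p0 p1 st else wmInnerA sa la st) = g st) :
    ∀ (fuel step : Nat),
      wmWhileA p0 p1 sa la diff step fuel =
        ((List.range' step fuel).filter
          (fun st => (PySem.List.pyGet? (g st) 0 == some 1) ||
                     (PySem.List.pyGet? (g st) (-1) == some 1))).map g := by
  intro fuel
  induction fuel with
  | zero => intro step; simp [wmWhileA]
  | succ n ih =>
    intro step
    rw [List.range'_succ]
    simp only [wmWhileA, hm, List.filter_cons]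
    by_cases hk : ((PySem.List.pyGet? (g step) 0 == some 1) ||
                   (PySem.List.pyGet? (g step) (-1) == some 1)) = true
    · simp [hk, ih]
    · simp [hk, ih]

-- common per-token core: A's while-loop block equals B's filtered-diagonals block,
-- given that A's per-step vector coincides with wmVec s l
theorem token_core (p0 p1 sa la s l : List Char) (hs : s ≠ []) (hle : s.length ≤ l.length)
    (diff : Nat) (hdiff : diff = l.length - s.length)
    (hm : ∀ st : Nat, (if diff = 0 then wmInnerA p0 p1 st else wmInnerA sa la st) = wmVec s l st)
    (maps : List (List Int)) :
    maps ++ wmWhileA p0 p1 sa la diff 0 (diff + 1) =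
      maps ++ ((List.range (l.length - s.length + 1)).filter (fun step =>
          (((wmMatB s l).getD 0 []).getD step 0 != 0) ||
          (((wmMatB s l).getD (s.length - 1) []).getD (step + s.length - 1) 0 != 0))).map
        (fun step => wmDiagB (wmMatB s l) s.length step) := by
  rw [wmWhileA_eq p0 p1 sa la diff (wmVec s l) hm (diff + 1) 0]
  congr 1
  rw [← List.range_eq_range', hdiff]
  have hfilter :
      (List.range (l.length - s.length + 1)).filter
        (fun st => (PySem.List.pyGet? (wmVec s l st) 0 == some 1) ||
                   (PySem.List.pyGet? (wmVec s l st) (-1) == some 1))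
      = (List.range (l.length - s.length + 1)).filter (fun step =>
          (((wmMatB s l).getD 0 []).getD step 0 != 0) ||
          (((wmMatB s l).getD (s.length - 1) []).getD (step + s.length - 1) 0 != 0)) := by
    apply List.filter_congr
    intro st hst
    rw [List.mem_range] at hst
    rw [keep_eq s l hs st, bnd_eq s l hs hle st (by omega)]
  rw [hfilter]
  apply List.map_congr_left
  intro st hst
  have hst' : st < l.length - s.length + 1 := List.mem_range.mp (List.mem_of_mem_filter hst)
  exact (wmDiagB_eq s l st (by omega) hle).symm

-- ===== VERDICT (by name: the statement is the Claim_ definition above) =====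
theorem word_mapping_spec : Claim_equal_word_mapping := by
  intro target token_dict syllables _ hpre
  unfold Spec_word_mapping word_mapping word_mapping_alt
  obtain ⟨hkey, htok⟩ := hpre
  cases hlk : List.lookup syllables token_dict with
  | none => exact absurd hlk hkey
  | some tokens =>
    rw [hlk] at htok
    simp only [Option.getD_some] at htok
    simp only
    apply PySem.List.foldl_congr_mem
    intro maps v hv
    have hne := htok v hv
    have hvl : v.toList ≠ [] := fun h => hne.1 (String.toList_inj.mp (by rw [h]; decide))
    have htl : target.toList ≠ [] := fun h => hne.2 (String.toList_inj.mp (by rw [h]; decide))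
    by_cases h : v.toList.length ≤ target.toList.length
    · simp only [if_pos h]
      by_cases h2 : target.toList.length > v.toList.length
      · -- v strictly shorter: smaller = v, longer = target, diff > 0
        rw [if_neg (by omega : ¬ target.toList.length < v.toList.length), if_pos h2]
        exact token_core v.toList target.toList v.toList target.toList v.toList target.toList
          hvl h _ rfl
          (fun st => by
            have hd : target.toList.length - v.toList.length ≠ 0 := by omega
            simp only [if_neg hd, wmInnerA_eq_map]) maps
      · -- equal lengths: smaller = longer = v, diff = 0, compare v to target
        have heq : v.toList.length = target.toList.length := by omega
        rw [if_neg (by omega : ¬ target.toList.length < v.toList.length), if_neg h2]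
        exact token_core v.toList target.toList v.toList v.toList v.toList target.toList
          hvl h _ (by omega)
          (fun st => by
            simp [wmInnerA_eq_map, wmVec, heq]) maps
    · -- target strictly shorter: smaller = target, longer = v, diff > 0
      simp only [if_neg h]
      rw [if_pos (by omega : target.toList.length < v.toList.length),
          if_neg (by omega : ¬ target.toList.length > v.toList.length)]
      exact token_core v.toList target.toList target.toList v.toList target.toList v.toList
        htl (by omega) _ rfl
        (fun st => by
          have hd : v.toList.length - target.toList.length ≠ 0 := by omega
          simp only [if_neg hd, wmInnerA_eq_map]) maps
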